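-- pv_equiv track=rewrite | github.com/aboucaud/adventofcode2017 | day15.py | generator_multiple
-- ===== SOURCE A (Python) =====
-- from typing import List, Iterator
--
-- DIVIDEND = 2147483647
--
-- def to_binary(val: int) -> str:
--     return bin(val)[2:].zfill(32)
--
-- def generator_multiple(val: int, factor: int, n_iter: int, multiple: int) -> Iterator[str]:
--     i = 0
--     while i < n_iter:
--         res = (val * factor) % DIVIDEND
--         val = res
--         if res % multiple != 0:
--             continue
--         yield to_binary(res)
--         i += 1
-- ===== SOURCE B (Python) =====
-- from typing import Iterator
--
-- DIVIDEND = 2147483647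
-- BLOCK = 1024
--
--
-- def to_binary(val: int) -> str:
--     return format(val, '032b')
--
--
-- def generator_multiple(val: int, factor: int, n_iter: int, multiple: int) -> Iterator[str]:
--     # stride decomposition: precompute powers[j] = factor**(j+1) mod DIVIDEND once;
--     # the raw values of one block are base * powers[j] mod DIVIDEND, and base jumps
--     # by factor**BLOCK between blocks -- no carried value-to-value recurrence
--     powers = []
--     p = 1
--     for _ in range(BLOCK):
--         p = p * factor % DIVIDEND
--         powers.append(p)
--     jump = powers[-1]
--     base = val
--     count = 0
--     while count < n_iter:
--         for p in powers:
--             v = base * p % DIVIDEND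
--             if v % multiple == 0:
--                 yield to_binary(v)
--                 count += 1
--                 if count == n_iter:
--                     return
--         base = base * jump % DIVIDEND
-- ===== Notes on version B (the rewrite author's own statement) =====
-- stated objective: alternative
-- what changed: Replaces A's carried value-to-value recurrence val=(val*factor)%DIVIDEND with continue and a manual yield counter by a precomputed 1024-entry power table: each block's raw values are base*powers[j] mod DIVIDEND and base advances by the jump factor**1024 between blocks.
import Mathlib
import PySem

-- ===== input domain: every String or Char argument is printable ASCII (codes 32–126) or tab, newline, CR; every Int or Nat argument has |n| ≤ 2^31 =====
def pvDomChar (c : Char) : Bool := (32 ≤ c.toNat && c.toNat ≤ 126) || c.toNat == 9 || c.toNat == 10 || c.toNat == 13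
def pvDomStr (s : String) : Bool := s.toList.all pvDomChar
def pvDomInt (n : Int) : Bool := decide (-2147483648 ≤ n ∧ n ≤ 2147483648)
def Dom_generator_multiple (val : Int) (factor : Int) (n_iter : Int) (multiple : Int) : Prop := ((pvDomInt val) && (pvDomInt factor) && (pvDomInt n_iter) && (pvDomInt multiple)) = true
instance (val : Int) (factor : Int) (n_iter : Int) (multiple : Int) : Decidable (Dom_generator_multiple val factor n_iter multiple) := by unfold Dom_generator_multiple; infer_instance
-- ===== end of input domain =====

-- B replaces A's carried value-to-value recurrence (val = (val*factor)%DIVIDEND with continue and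
-- a manual counter) by a precomputed 1024-entry power table: each block's raw values are
-- base * powers[j] mod DIVIDEND and base jumps by factor^1024 between blocks; alternative
-- decomposition over a different data structure, same asymptotic cost.
-- Both ports make the possibly-infinite Python loop total with a fuel guard (n_iter.toNat * 2^31,
-- enough for every terminating run since the value stream is periodic with period < 2^31).


-- ===== PORT A =====
def DIVIDEND : Int := 2147483647

-- bin(val)[2:].zfill(32); exact for 0 ≤ val, the only arguments ever passed (a value of `% DIVIDEND`)
def to_binary (val : Int) : String :=
  let bits := Nat.toDigits 2 val.toNat
  String.ofList (List.replicate (32 - bits.length) '0' ++ bits)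

-- A's while loop, step for step (res, the continue branch, yield, i += 1), made total by a fuel
-- guard; fuel = n_iter.toNat * 2^31 is exact on every input where Python A terminates (the value
-- stream is purely periodic with period < 2^31, so each of the n_iter yields arrives within 2^31 steps)
def genLoopA (factor : Int) (n_iter : Int) (multiple : Int) : Nat → Int → Int → List String → List String
  | 0, _, _, acc => acc
  | fuel+1, val, i, acc =>
    if i < n_iter then
      let res := PySem.Int.mod (val * factor) DIVIDEND
      if PySem.Int.mod res multiple ≠ 0 then
        genLoopA factor n_iter multiple fuel res i acc          -- continue
      else
        genLoopA factor n_iter multiple fuel res (i + 1) (acc ++ [to_binary res])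
    else acc

def generator_multiple (val : Int) (factor : Int) (n_iter : Int) (multiple : Int) : List String :=
  genLoopA factor n_iter multiple (n_iter.toNat * 2 ^ 31) val 0 []

-- ===== PORT B =====
-- format(val, '032b'); exact for 0 ≤ val, the only arguments ever passed
def to_binary_alt (val : Int) : String :=
  let bits := Nat.toDigits 2 val.toNat
  String.ofList (List.replicate (32 - bits.length) '0' ++ bits)

-- Source B's precompute loop: p = p * factor % DIVIDEND; powers.append(p), BLOCK times
def powTableAux (factor : Int) : Nat → Int → List Int
  | 0, _ => []
  | n+1, p =>
    let p' := PySem.Int.mod (p * factor) DIVIDEND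
    p' :: powTableAux factor n p'

-- Source B's inner `for p in powers` loop (yield, count += 1, the early return at count == n_iter)
def innerB (n_iter : Int) (multiple : Int) (base : Int) : List Int → Int → List String → Int × List String
  | [], count, acc => (count, acc)
  | p :: rest, count, acc =>
    let v := PySem.Int.mod (base * p) DIVIDEND
    if PySem.Int.mod v multiple = 0 then
      if count + 1 = n_iter then (count + 1, acc ++ [to_binary_alt v])
      else innerB n_iter multiple base rest (count + 1) (acc ++ [to_binary_alt v])
    else innerB n_iter multiple base rest count acc

-- Source B's outer `while count < n_iter` loop, made total by a fuel guard counted in blocks;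
-- fuel = n_iter.toNat * 2^21 blocks = the same n_iter.toNat * 2^31 raw values as port A
def genLoopB (n_iter : Int) (multiple : Int) (powers : List Int) (jump : Int) : Nat → Int → Int → List String → List String
  | 0, _, _, acc => acc
  | fuel+1, base, count, acc =>
    if count < n_iter then
      let r := innerB n_iter multiple base powers count acc
      genLoopB n_iter multiple powers jump fuel (PySem.Int.mod (base * jump) DIVIDEND) r.1 r.2
    else acc

def generator_multiple_alt (val : Int) (factor : Int) (n_iter : Int) (multiple : Int) : List String :=
  let powers := powTableAux factor 1024 1
  let jump := powers.getLastD 1        -- powers[-1]; powers is never empty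
  genLoopB n_iter multiple powers jump (n_iter.toNat * 2 ^ 21) val 0 []

-- ===== PRECONDITION & SPEC =====
-- Pre_ excludes only multiple = 0 with n_iter > 0, where Python A raises ZeroDivisionError
-- on the first iteration (B raises it there too).
def Pre_generator_multiple (val : Int) (factor : Int) (n_iter : Int) (multiple : Int) : Prop :=
  n_iter ≤ 0 ∨ multiple ≠ 0
instance (val : Int) (factor : Int) (n_iter : Int) (multiple : Int) : Decidable (Pre_generator_multiple val factor n_iter multiple) := by unfold Pre_generator_multiple; infer_instance

def pvWitness_generator_multiple : Int × Int × Int × Int := (5, 3, 2, 3)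

def Spec_generator_multiple (val : Int) (factor : Int) (n_iter : Int) (multiple : Int) (out : List String) : Prop := out = generator_multiple_alt val factor n_iter multiple
instance (val : Int) (factor : Int) (n_iter : Int) (multiple : Int) (out : List String) : Decidable (Spec_generator_multiple val factor n_iter multiple out) := by unfold Spec_generator_multiple; infer_instance

-- ===== CLAIM (what is proved, stated in full; the proofs are below) =====
def Claim_equal_generator_multiple : Prop := ∀ (val : Int) (factor : Int) (n_iter : Int) (multiple : Int), Dom_generator_multiple val factor n_iter multiple → Pre_generator_multiple val factor n_iter multiple → Spec_generator_multiple val factor n_iter multiple (generator_multiple val factor n_iter multiple)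

-- ===== LEMMAS AND PROOFS =====

theorem DIVIDEND_pos : (0 : Int) < DIVIDEND := by decide

theorem modD_eq (a : Int) : PySem.Int.mod a DIVIDEND = a % DIVIDEND :=
  PySem.Int.mod_eq_emod_of_pos DIVIDEND_pos

theorem alt_tb : to_binary_alt = to_binary := rfl

theorem mulmod_l (a b n : Int) : a % n * b % n = a * b % n := by
  rw [Int.mul_emod, Int.emod_emod_of_dvd _ dvd_rfl, ← Int.mul_emod]

theorem mulmod_r (a b n : Int) : a * (b % n) % n = a * b % n := by
  rw [Int.mul_emod, Int.emod_emod_of_dvd _ dvd_rfl, ← Int.mul_emod]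

-- each table entry is the previous entry times factor, mod DIVIDEND
def TableFrom (factor : Int) : Int → List Int → Prop
  | _, [] => True
  | t, p :: rest => p = PySem.Int.mod (t * factor) DIVIDEND ∧ TableFrom factor p rest

theorem tableFrom_powTableAux (factor : Int) : ∀ (n : Nat) (p : Int), TableFrom factor p (powTableAux factor n p) := by
  intro n
  induction n with
  | zero => intro p; trivial
  | succ n ih => intro p; exact ⟨rfl, ih _⟩

theorem powTableAux_length (factor : Int) : ∀ (n : Nat) (p : Int), (powTableAux factor n p).length = n := by
  intro n
  induction n with
  | zero => intro p; rfl
  | succ n ih => intro p; simp [powTableAux, ih]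

theorem A_stop (factor n_iter multiple : Int) (fuel : Nat) (val i : Int) (acc : List String)
    (h : ¬ i < n_iter) : genLoopA factor n_iter multiple fuel val i acc = acc := by
  cases fuel with
  | zero => rfl
  | succ fuel => rw [genLoopA, if_neg h]

-- one block: A's loop run pb.length raw steps equals Source B's inner for-loop, under the chain invariant
theorem inner_corr (factor n_iter multiple base : Int) :
    ∀ (pb : List Int) (R : Nat) (valA t count : Int) (acc : List String),
      TableFrom factor t pb →
      valA % DIVIDEND = (base * t) % DIVIDEND →
      count < n_iter →
      ∃ valA',
        genLoopA factor n_iter multiple (pb.length + R) valA count acc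
          = genLoopA factor n_iter multiple R valA'
              (innerB n_iter multiple base pb count acc).1
              (innerB n_iter multiple base pb count acc).2
        ∧ ((innerB n_iter multiple base pb count acc).1 < n_iter →
            valA' % DIVIDEND = (base * pb.getLastD t) % DIVIDEND) := by
  intro pb
  induction pb with
  | nil =>
    intro R valA t count acc _ hv hc
    exact ⟨valA, by simp [innerB], fun _ => hv⟩
  | cons p rest ih =>
    intro R valA t count acc htab hv hc
    obtain ⟨hp, htab'⟩ := htab
    have hlen : (p :: rest).length + R = (rest.length + R) + 1 := by simp; omega
    rw [hlen]
    simp only [genLoopA, innerB, alt_tb, List.getLastD_cons]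
    rw [if_pos hc]
    have hres : PySem.Int.mod (valA * factor) DIVIDEND = PySem.Int.mod (base * p) DIVIDEND := by
      rw [modD_eq, modD_eq, hp, modD_eq]
      calc valA * factor % DIVIDEND
          = valA % DIVIDEND * factor % DIVIDEND := (mulmod_l _ _ _).symm
        _ = base * t % DIVIDEND * factor % DIVIDEND := by rw [hv]
        _ = base * t * factor % DIVIDEND := mulmod_l _ _ _
        _ = base * (t * factor) % DIVIDEND := by rw [mul_assoc]
        _ = base * (t * factor % DIVIDEND) % DIVIDEND := (mulmod_r _ _ _).symm
    rw [hres]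
    have hvinv : PySem.Int.mod (base * p) DIVIDEND % DIVIDEND = (base * p) % DIVIDEND := by
      rw [modD_eq, Int.emod_emod_of_dvd _ dvd_rfl]
    by_cases hz : PySem.Int.mod (PySem.Int.mod (base * p) DIVIDEND) multiple = 0
    · rw [if_neg (by simpa using hz), if_pos hz]
      by_cases hstop : count + 1 = n_iter
      · rw [if_pos hstop]
        refine ⟨PySem.Int.mod (base * p) DIVIDEND, ?_, fun hlt => absurd hlt (by simp [hstop])⟩
        rw [A_stop factor n_iter multiple _ _ (count + 1) _ (by omega),
            A_stop factor n_iter multiple R _ (count + 1) _ (by omega)]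
      · rw [if_neg hstop]
        exact ih R _ p (count + 1) _ htab' hvinv (by omega)
    · rw [if_pos hz, if_neg hz]
      exact ih R _ p count acc htab' hvinv hc

-- block-by-block correspondence: A with blocks*1024 raw steps equals B with blocks of fuel
theorem outer_corr (factor n_iter multiple : Int) :
    ∀ (blocks : Nat) (valA base count : Int) (acc : List String),
      valA % DIVIDEND = base % DIVIDEND →
      genLoopA factor n_iter multiple (blocks * 1024) valA count acc
        = genLoopB n_iter multiple (powTableAux factor 1024 1) ((powTableAux factor 1024 1).getLastD 1) blocks base count acc := by
  intro blocks
  induction blocks with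
  | zero => intro valA base count acc _; rfl
  | succ blocks ih =>
    intro valA base count acc hv
    simp only [genLoopB]
    by_cases hc : count < n_iter
    · rw [if_pos hc]
      have hlen : (blocks + 1) * 1024 = (powTableAux factor 1024 1).length + blocks * 1024 := by
        rw [powTableAux_length]
        omega
      rw [hlen]
      obtain ⟨valA', heq, hinv⟩ := inner_corr factor n_iter multiple base
        (powTableAux factor 1024 1) (blocks * 1024) valA 1 count acc
        (tableFrom_powTableAux factor 1024 1) (by rw [hv, mul_one]) hc
      rw [heq]
      by_cases hlt : (innerB n_iter multiple base (powTableAux factor 1024 1) count acc).1 < n_iter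
      · exact ih valA' _ _ _ (by rw [hinv hlt, modD_eq, Int.emod_emod_of_dvd _ dvd_rfl])
      · rw [A_stop factor n_iter multiple _ valA' _ _ hlt]
        cases blocks with
        | zero => rfl
        | succ b => simp only [genLoopB]; rw [if_neg hlt]
    · rw [if_neg hc]
      exact A_stop factor n_iter multiple _ valA count acc hc

-- ===== VERDICT (by name: the statement is the Claim_ definition above) =====
theorem generator_multiple_spec : Claim_equal_generator_multiple := by
  unfold Claim_equal_generator_multiple
  intro val factor n_iter multiple _ _
  unfold Spec_generator_multiple generator_multiple generator_multiple_alt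
  have hfuel : n_iter.toNat * 2 ^ 31 = (n_iter.toNat * 2 ^ 21) * 1024 := by
    rw [mul_assoc]
    norm_num
  rw [hfuel]
  exact outer_corr factor n_iter multiple (n_iter.toNat * 2 ^ 21) val val 0 [] rfl
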